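-- pv_equiv track=rewrite | github.com/rspraneeth/DSA-and-others | leetcode/wordSubsets.py | wordSubsets1
-- ===== SOURCE A (Python) =====
-- from collections import defaultdict
--
-- def wordSubsets1(words1, words2):
--     """Bruteforce: Using hashmap and checking frequency, but this makes time complexity very worst"""
--     hw1 = []
--     for word in words1:
--         hm = defaultdict(int)
--         for i in word:
--             if i in hm:
--                 hm[i] += 1
--             else:
--                 hm[i] = 1
--         hw1.append(hm)
--
--     hw2 = []
--     for word in words2:
--         hm = defaultdict(int)
--         for i in word:
--             if i in hm:
--                 hm[i] += 1
--             else: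
--                 hm[i] = 1
--         hw2.append(hm)
--     ans = []
--     l = 0
--     for i in hw1:
--         flag = True
--         for j in hw2:
--             for k in j:
--                 if k not in i:
--                     flag = False
--                     break
--                 if j[k] > i[k]:
--                     flag = False
--                     break
--
--             if not flag:
--                 break
--         if flag:
--             ans.append(words1[l])
--         l += 1
--
--     return ans
-- ===== SOURCE B (Python) =====
-- from collections import Counter
--
-- def wordSubsets1(words1, words2):
--     req = {}
--     for w in words2:
--         for c, v in Counter(w).items():
--             if v > req.get(c, 0):
--                 req[c] = v
--     items = list(req.items())
--     res = []
--     for w in words1: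
--         cw = Counter(w)
--         if all(cw[c] >= v for c, v in items):
--             res.append(w)
--     return res
-- ===== Notes on version B (the rewrite author's own statement) =====
-- stated objective: faster
-- what changed: B merges words2 into one max-frequency requirement dict and checks each word of words1 against it once, instead of A's per-pair check of every words1 counter against every words2 counter.
import Mathlib
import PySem

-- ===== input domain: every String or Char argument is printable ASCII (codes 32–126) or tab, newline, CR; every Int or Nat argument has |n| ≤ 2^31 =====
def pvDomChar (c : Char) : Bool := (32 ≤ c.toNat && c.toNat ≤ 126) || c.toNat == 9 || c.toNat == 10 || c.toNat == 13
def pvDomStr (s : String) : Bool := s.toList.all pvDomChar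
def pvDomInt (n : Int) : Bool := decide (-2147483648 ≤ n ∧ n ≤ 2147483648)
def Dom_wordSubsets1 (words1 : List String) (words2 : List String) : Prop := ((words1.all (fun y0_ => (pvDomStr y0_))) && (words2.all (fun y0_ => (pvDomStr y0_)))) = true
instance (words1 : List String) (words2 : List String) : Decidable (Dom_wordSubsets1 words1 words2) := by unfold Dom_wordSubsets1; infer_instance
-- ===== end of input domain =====

-- B replaces A's all-pairs counter comparison by one merged max-frequency requirement dict
-- checked once per word of words1; the return values are proved equal on all inputs.

-- ===== PORT A =====
-- the per-word frequency dict A builds ('if i in hm: hm[i] += 1 else: hm[i] = 1')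
def pvCount (w : List Char) : PySem.Dict Char Int :=
  w.foldl (fun hm i =>
    if hm.contains i then hm.insert i (hm.getD i 0 + 1) else hm.insert i 1)
    PySem.Dict.empty

-- A's inner loop 'for k in j: …' with its two breaks
def pvCheckKeys (i j : PySem.Dict Char Int) : List Char → Bool
  | [] => true
  | k :: rest =>
    if !(i.contains k) then false
    else if j.getD k 0 > i.getD k 0 then false
    else pvCheckKeys i j rest

-- A's middle loop 'for j in hw2: … if not flag: break'
def pvCheckAll (i : PySem.Dict Char Int) : List (PySem.Dict Char Int) → Bool
  | [] => true
  | j :: rest => if pvCheckKeys i j j.keys then pvCheckAll i rest else false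

def wordSubsets1 (words1 : List String) (words2 : List String) : List String :=
  let hw1 := words1.foldl (fun acc word => acc ++ [pvCount word.toList]) []
  let hw2 := words2.foldl (fun acc word => acc ++ [pvCount word.toList]) []
  (hw1.foldl (fun (st : List String × Int) i =>
      (if pvCheckAll i hw2 then st.1 ++ [PySem.List.pyGetD words1 st.2 ""] else st.1,
       st.2 + 1))
    ([], (0 : Int))).1

-- ===== PORT B =====
-- 'for w in words2: for c, v in Counter(w).items(): if v > req.get(c, 0): req[c] = v'
def pvMerge (words2 : List String) : PySem.Dict Char Int :=
  words2.foldl (fun req w =>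
    (PySem.Dict.counter w.toList).items.foldl (fun req cv =>
      if cv.2 > req.getD cv.1 0 then req.insert cv.1 cv.2 else req) req)
    PySem.Dict.empty

def wordSubsets1_alt (words1 : List String) (words2 : List String) : List String :=
  let items := (pvMerge words2).items
  words1.foldl (fun res w =>
    if items.all (fun cv => (PySem.Dict.counter w.toList).getD cv.1 0 ≥ cv.2)
    then res ++ [w] else res) []

-- ===== PRECONDITION & SPEC =====
def Spec_wordSubsets1 (words1 : List String) (words2 : List String) (out : List String) : Prop := out = wordSubsets1_alt words1 words2
instance (words1 : List String) (words2 : List String) (out : List String) : Decidable (Spec_wordSubsets1 words1 words2 out) := by unfold Spec_wordSubsets1; infer_instance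

-- ===== CLAIM (what is proved, stated in full; the proofs are below) =====
def Claim_equal_wordSubsets1 : Prop := ∀ (words1 : List String) (words2 : List String), Dom_wordSubsets1 words1 words2 → Spec_wordSubsets1 words1 words2 (wordSubsets1 words1 words2)

-- ===== LEMMAS AND PROOFS =====

-- A's frequency loop builds exactly Counter(word)
lemma pvCount_eq_counter (w : List Char) : pvCount w = PySem.Dict.counter w := by
  unfold pvCount
  rw [← PySem.Dict.foldl_insert_getD_add_one_eq_counter]
  congr 1
  funext hm i
  by_cases h : hm.contains i
  · simp [h]
  · simp only [Bool.not_eq_true] at h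
    rw [PySem.Dict.getD_of_not_contains (h := h)]; simp [h]

-- A's inner loop (with breaks) is an 'all' over the key list
lemma pvCheckKeys_eq_all (i j : PySem.Dict Char Int) (ks : List Char) :
    pvCheckKeys i j ks = ks.all (fun k => i.contains k && !(decide (j.getD k 0 > i.getD k 0))) := by
  induction ks with
  | nil => rfl
  | cons k rest ih =>
    simp only [pvCheckKeys, List.all_cons, ih]
    by_cases h : i.contains k
    · by_cases h2 : j.getD k 0 > i.getD k 0 <;> simp [h, h2]
    · simp only [Bool.not_eq_true] at h; simp [h]

-- one words2-word check ↔ pointwise count domination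
lemma pvCheckKeys_counter_iff (w1 w2 : List Char) :
    pvCheckKeys (PySem.Dict.counter w1) (PySem.Dict.counter w2) (PySem.Dict.counter w2).keys = true
      ↔ ∀ c : Char, w2.count c ≤ w1.count c := by
  rw [pvCheckKeys_eq_all, PySem.Dict.keys_counter, List.all_eq_true]
  constructor
  · intro h c
    by_cases hc : c ∈ w2
    · have := h c ((PySem.Set.mem_ofList w2 c).2 hc)
      simp only [Bool.and_eq_true, Bool.not_eq_true', decide_eq_false_iff_not, not_lt,
        PySem.Dict.getD_counter] at this
      exact_mod_cast this.2
    · simp [List.count_eq_zero_of_not_mem hc]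
  · intro h c hc
    have hc2 : c ∈ w2 := (PySem.Set.mem_ofList w2 c).1 hc
    have h1 : 0 < w2.count c := List.count_pos_iff.2 hc2
    have h2 := h c
    have hw1 : c ∈ w1 := List.count_pos_iff.1 (lt_of_lt_of_le h1 h2)
    simp only [Bool.and_eq_true, Bool.not_eq_true', decide_eq_false_iff_not, not_lt,
      PySem.Dict.getD_counter, PySem.Dict.contains_counter]
    exact ⟨by simpa using hw1, by exact_mod_cast h2⟩

-- A's middle loop over all words2 counters
lemma pvCheckAll_iff (w1 : List Char) (ws : List String) :
    pvCheckAll (PySem.Dict.counter w1) (ws.map (fun w => PySem.Dict.counter w.toList)) = true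
      ↔ ∀ w2 ∈ ws, ∀ c : Char, w2.toList.count c ≤ w1.count c := by
  induction ws with
  | nil => simp [pvCheckAll]
  | cons w rest ih =>
    simp only [List.map_cons, pvCheckAll]
    by_cases h : pvCheckKeys (PySem.Dict.counter w1) (PySem.Dict.counter w.toList) (PySem.Dict.counter w.toList).keys
    · rw [if_pos h, ih]
      simp only [List.mem_cons]
      constructor
      · intro hr x hx
        exact hx.elim (fun he => he ▸ fun c => (pvCheckKeys_counter_iff w1 w.toList).1 h c) (hr x)
      · intro hr x hx; exact hr x (Or.inr hx)
    · have hne : ¬ (pvCheckKeys (PySem.Dict.counter w1) (PySem.Dict.counter w.toList) (PySem.Dict.counter w.toList).keys = true) := by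
        simp only [Bool.not_eq_true] at h; rw [h]; exact Bool.false_ne_true
      rw [if_neg hne]
      simp only [Bool.false_eq_true, false_iff]
      intro hr
      exact hne ((pvCheckKeys_counter_iff w1 w.toList).2 (fun c => hr w List.mem_cons_self c))

-- pointwise value of the one-pair merge step fold
lemma foldl_maxstep_getD (ps : List (Char × Int)) (d : PySem.Dict Char Int) (c : Char) :
    (ps.foldl (fun req cv => if cv.2 > req.getD cv.1 0 then req.insert cv.1 cv.2 else req) d).getD c 0
      = ps.foldl (fun m cv => if cv.1 = c then max m cv.2 else m) (d.getD c 0) := by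
  induction ps generalizing d with
  | nil => rfl
  | cons p rest ih =>
    simp only [List.foldl_cons]
    rw [ih]
    congr 1
    by_cases h2 : p.1 = c
    · subst h2
      by_cases h1 : p.2 > d.getD p.1 0
      · rw [if_pos h1, PySem.Dict.getD_insert, if_pos rfl, if_pos rfl]; omega
      · rw [if_neg h1, if_pos rfl]; omega
    · by_cases h1 : p.2 > d.getD p.1 0
      · simp only [if_pos h1, PySem.Dict.getD_insert]
        rw [if_neg (fun hh => h2 hh.symm), if_neg h2]
      · simp [h1, h2]

-- a max-fold over a duplicate-free list hits c at most once
lemma foldl_max_nodup (l : List Char) (hl : l.Nodup) (g : Char → Int) (c : Char) (m0 : Int) :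
    l.foldl (fun m k => if k = c then max m (g k) else m) m0
      = if c ∈ l then max m0 (g c) else m0 := by
  induction l generalizing m0 with
  | nil => simp
  | cons k rest ih =>
    simp only [List.nodup_cons] at hl
    by_cases h : k = c
    · subst h
      simp only [List.foldl_cons, List.mem_cons, true_or, if_pos]
      rw [ih hl.2, if_neg hl.1]
    · have hck : ¬ c = k := fun hh => h hh.symm
      simp only [List.foldl_cons, if_neg h, ih hl.2, List.mem_cons, hck, false_or]

-- merging one word: getD becomes the max with that word's count
lemma merge_one_getD (w : List Char) (d : PySem.Dict Char Int) (c : Char) (h : 0 ≤ d.getD c 0) :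
    ((PySem.Dict.counter w).items.foldl (fun req cv => if cv.2 > req.getD cv.1 0 then req.insert cv.1 cv.2 else req) d).getD c 0
      = max (d.getD c 0) (w.count c) := by
  rw [foldl_maxstep_getD, PySem.Dict.items_counter, List.foldl_map]
  rw [foldl_max_nodup _ (PySem.Set.nodup_ofList w) (fun k => (w.count k : Int)) c]
  by_cases hc : c ∈ w
  · simp [(PySem.Set.mem_ofList w c).2 hc]
  · rw [if_neg (fun hm => hc ((PySem.Set.mem_ofList w c).1 hm))]
    rw [List.count_eq_zero_of_not_mem hc]
    omega

-- the merged requirement is ≤ cnt iff every processed word's count is ≤ cnt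
lemma pvMergeAux_le_iff (ws : List String) (c : Char) (cnt : Int) :
    ∀ d : PySem.Dict Char Int, 0 ≤ d.getD c 0 →
      ((ws.foldl (fun req w =>
          (PySem.Dict.counter w.toList).items.foldl (fun req cv =>
            if cv.2 > req.getD cv.1 0 then req.insert cv.1 cv.2 else req) req) d).getD c 0 ≤ cnt
        ↔ d.getD c 0 ≤ cnt ∧ ∀ w ∈ ws, (w.toList.count c : Int) ≤ cnt) := by
  induction ws with
  | nil => intro d hd; simp
  | cons w rest ih =>
    intro d hd
    simp only [List.foldl_cons]
    have hstep := merge_one_getD w.toList d c hd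
    rw [ih _ (by rw [hstep]; positivity), hstep]
    simp only [List.mem_cons]
    constructor
    · rintro ⟨h1, h2⟩
      exact ⟨le_trans (le_max_left _ _) h1, fun x hx => hx.elim (fun he => he ▸ le_trans (le_max_right _ _) h1) (h2 x)⟩
    · rintro ⟨h1, h2⟩
      exact ⟨max_le h1 (h2 w (Or.inl rfl)), fun x hx => h2 x (Or.inr hx)⟩

-- the merge's conditional insert keeps the keys duplicate-free
lemma foldl_step_nodup (ps : List (Char × Int)) (d : PySem.Dict Char Int) (h : d.keys.Nodup) :
    (ps.foldl (fun req cv => if cv.2 > req.getD cv.1 0 then req.insert cv.1 cv.2 else req) d).keys.Nodup := by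
  induction ps generalizing d with
  | nil => exact h
  | cons p rest ih =>
    simp only [List.foldl_cons]
    apply ih
    by_cases h1 : p.2 > d.getD p.1 0
    · simpa [h1] using PySem.Dict.nodup_keys_insert d p.1 p.2 h
    · simpa [h1] using h

lemma pvMerge_nodup (ws : List String) : (pvMerge ws).keys.Nodup := by
  unfold pvMerge
  have : ∀ d : PySem.Dict Char Int, d.keys.Nodup →
      (ws.foldl (fun req w =>
        (PySem.Dict.counter w.toList).items.foldl (fun req cv =>
          if cv.2 > req.getD cv.1 0 then req.insert cv.1 cv.2 else req) req) d).keys.Nodup := by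
    induction ws with
    | nil => exact fun d h => h
    | cons w rest ih => exact fun d h => ih _ (foldl_step_nodup _ _ h)
  exact this _ (by simp)

-- B's per-word test ↔ the same pointwise count domination as A's
lemma alt_test_iff (w1 : List Char) (ws : List String) :
    ((pvMerge ws).items.all (fun cv => (PySem.Dict.counter w1).getD cv.1 0 ≥ cv.2) = true)
      ↔ ∀ w2 ∈ ws, ∀ c : Char, w2.toList.count c ≤ w1.count c := by
  rw [PySem.Dict.items_eq_map_keys _ (pvMerge_nodup ws) 0, List.all_map, List.all_eq_true]
  have key : ∀ c : Char, ((pvMerge ws).getD c 0 ≤ (w1.count c : Int)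
      ↔ ∀ w2 ∈ ws, (w2.toList.count c : Int) ≤ (w1.count c : Int)) := by
    intro c
    have := pvMergeAux_le_iff ws c (w1.count c) PySem.Dict.empty (by simp)
    unfold pvMerge
    rw [this]
    simp
  constructor
  · intro h w2 hw2 c
    by_cases hc : c ∈ (pvMerge ws).keys
    · have := h c hc
      simp only [Function.comp, ge_iff_le, decide_eq_true_eq, PySem.Dict.getD_counter] at this
      exact_mod_cast ((key c).1 this) w2 hw2
    · have h0 : (pvMerge ws).getD c 0 = 0 :=
        PySem.Dict.getD_of_not_contains _ 0 (by
          rw [← Bool.not_eq_true]; exact fun hcc => hc ((PySem.Dict.contains_iff_mem_keys _ c).1 hcc))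
      have := (key c).1 (by rw [h0]; positivity)
      exact_mod_cast this w2 hw2
  · intro h c hc
    simp only [Function.comp, ge_iff_le, decide_eq_true_eq, PySem.Dict.getD_counter]
    exact (key c).2 (fun w2 hw2 => by exact_mod_cast h w2 hw2 c)

-- A's per-word decision equals B's per-word decision (as Booleans)
lemma test_eq (words2 : List String) (w : String) :
    pvCheckAll (PySem.Dict.counter w.toList) (words2.map (fun x => PySem.Dict.counter x.toList))
      = (pvMerge words2).items.all (fun cv => (PySem.Dict.counter w.toList).getD cv.1 0 ≥ cv.2) := by
  rw [Bool.eq_iff_iff, pvCheckAll_iff, alt_test_iff]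

-- the indexed output loop of A produces the same list as B's filtering loop
lemma main_fold (base words2 : List String) :
    ∀ (suf pre acc : List String), base = pre ++ suf →
      ((suf.map (fun w => pvCount w.toList)).foldl
        (fun (st : List String × Int) i =>
          (if pvCheckAll i (words2.map (fun x => pvCount x.toList)) then st.1 ++ [PySem.List.pyGetD base st.2 ""] else st.1,
           st.2 + 1)) (acc, (pre.length : Int))).1
      = suf.foldl (fun res w =>
          if (pvMerge words2).items.all (fun cv => (PySem.Dict.counter w.toList).getD cv.1 0 ≥ cv.2)
          then res ++ [w] else res) acc := by
  intro suf
  induction suf with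
  | nil => intro pre acc _; rfl
  | cons w rest ih =>
    intro pre acc hbase
    simp only [List.map_cons, List.foldl_cons]
    have hget : PySem.List.pyGetD base ((pre.length : Int)) "" = w := by
      rw [PySem.List.pyGetD_natCast, hbase, List.getD_eq_getElem?_getD,
        List.getElem?_append_right (le_refl pre.length)]
      simp
    have hcond : pvCheckAll (pvCount w.toList) (words2.map (fun x => pvCount x.toList))
        = (pvMerge words2).items.all (fun cv => (PySem.Dict.counter w.toList).getD cv.1 0 ≥ cv.2) := by
      have hmap : (words2.map (fun x => pvCount x.toList)) = words2.map (fun x => PySem.Dict.counter x.toList) := by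
        simp [pvCount_eq_counter]
      rw [pvCount_eq_counter, hmap, test_eq]
    rw [hget, hcond]
    have hlen : (pre.length : Int) + 1 = ((pre ++ [w]).length : Int) := by
      simp [List.length_append]
    by_cases h : ((pvMerge words2).items.all (fun cv => (PySem.Dict.counter w.toList).getD cv.1 0 ≥ cv.2)) = true
    · rw [if_pos h]
      rw [hlen, ih (pre ++ [w]) (acc ++ [w]) (by simp [hbase])]
    · rw [if_neg h]
      rw [hlen, ih (pre ++ [w]) acc (by simp [hbase])]

-- ===== VERDICT (by name: the statement is the Claim_ definition above) =====
theorem wordSubsets1_spec : Claim_equal_wordSubsets1 := by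
  intro words1 words2 _
  unfold Spec_wordSubsets1 wordSubsets1 wordSubsets1_alt
  simp only [PySem.List.foldl_append_singleton_eq_map, List.nil_append]
  exact main_fold words1 words2 words1 [] [] rfl
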